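-- pv_equiv track=rewrite | github.com/apache2046/gobang | 2_alphazero/game2.py | have_five
-- ===== SOURCE A (Python) =====
-- def have_five(arr, x, y):
--     # x, y
--     w = h = 15
--
--     cnt = 0  # -
--     for i in range(1, 5):
--         if x - i < 0 or arr[y][x - i] == 0:
--             break
--         cnt += 1
--     for i in range(0, 5):
--         if x + i == w or arr[y][x + i] == 0:
--             break
--         cnt += 1
--     if cnt >= 5:
--         return True
--
--     cnt = 0  # |
--     for i in range(1, 5):
--         if y - i < 0 or arr[y - i][x] == 0:
--             break
--         cnt += 1
--     for i in range(0, 5):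
--         if y + i == h or arr[y + i][x] == 0:
--             break
--         cnt += 1
--     if cnt >= 5:
--         return True
--
--     cnt = 0  # \
--     for i in range(1, 5):
--         if x - i < 0 or y - i < 0 or arr[y - i][x - i] == 0:
--             break
--         cnt += 1
--     for i in range(0, 5):
--         if x + i == w or y + i == h or arr[y + i][x + i] == 0:
--             break
--         cnt += 1
--     if cnt >= 5:
--         return True
--
--     cnt = 0  # /
--     for i in range(1, 5):
--         if x - i < 0 or y + i == h or arr[y + i][x - i] == 0:
--             break
--         cnt += 1
--     for i in range(0, 5):
--         if x + i == w or y - i < 0 or arr[y - i][x + i] == 0: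
--             break
--         cnt += 1
--     if cnt >= 5:
--         return True
--
--     return False
-- ===== SOURCE B (Python) =====
-- def have_five(arr, x, y):
--     # Gather, per direction, the 9-slot liveness window at offsets -4..+4
--     # around (x, y) as two alive-chained rays, then slide a length-5 all-live
--     # window over it.
--     for dx, dy in ((1, 0), (0, 1), (1, 1), (1, -1)):
--         back = _ray(arr, x, y, -dx, -dy, 1)
--         fwd = _ray(arr, x, y, dx, dy, 0)
--         win = list(reversed(back)) + fwd
--         if any(all(win[s:s + 5]) for s in range(5)):
--             return True
--     return False
--
--
-- def _ray(arr, x, y, dx, dy, start):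
--     # liveness flags of the walk (x,y) + k*(dx,dy), k = start..4; once a slot
--     # is dead every later one is dead and is not probed
--     flags = []
--     alive = True
--     for k in range(start, 5):
--         alive = alive and _live(arr, x + dx * k, y + dy * k, dx, dy)
--         flags.append(alive)
--     return flags
--
--
-- def _live(arr, cx, cy, sx, sy):
--     # slot is live: board edge not crossed and cell nonzero
--     if _edge(cx, sx) or _edge(cy, sy):
--         return False
--     return arr[cy][cx] != 0
--
--
-- def _edge(c, s):
--     # crossed the board edge travelling in direction s (unit steps)
--     return c == 15 if s > 0 else (c < 0 if s < 0 else False)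
-- ===== Notes on version B (the rewrite author's own statement) =====
-- stated objective: alternative
-- what changed: B separates gathering from measuring: per direction it gathers the 9-slot liveness window at offsets -4..+4 around (x,y) as two alive-chained rays (a slot is dead once the walk crosses the 0/15 board edge or hits a zero cell) and then slides a length-5 all-live window over it, instead of A's eight interleaved outward counting loops with breaks, running counters and a >=5 threshold; Pre_ states exactly the inputs on which A (and B, which probes the same cells) returns without IndexError.
import Mathlib
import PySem

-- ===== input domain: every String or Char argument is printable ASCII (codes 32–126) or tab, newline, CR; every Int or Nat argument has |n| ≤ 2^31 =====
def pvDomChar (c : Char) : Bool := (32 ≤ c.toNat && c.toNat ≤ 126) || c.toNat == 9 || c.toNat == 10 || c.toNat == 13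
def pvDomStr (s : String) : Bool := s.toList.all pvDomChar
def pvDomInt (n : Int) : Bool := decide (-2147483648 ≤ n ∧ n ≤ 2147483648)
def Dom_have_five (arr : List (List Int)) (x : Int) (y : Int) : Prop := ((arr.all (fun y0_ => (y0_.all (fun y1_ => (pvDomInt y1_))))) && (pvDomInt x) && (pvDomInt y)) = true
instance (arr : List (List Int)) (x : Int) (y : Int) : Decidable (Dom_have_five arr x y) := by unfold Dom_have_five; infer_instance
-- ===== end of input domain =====

-- B replaces A's eight interleaved outward counting loops by, per direction, gathering the
-- 9-slot liveness window at offsets -4..+4 and sliding a length-5 all-live window over it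
-- (objective: alternative decomposition, same O(1) cost).

-- ===== PORT A =====

-- arr[cy][cx] with a 0 default; inside Pre_ every access A performs is in range,
-- so the default never replaces a value Python's A would have raised on
def pvCell (arr : List (List Int)) (cy cx : Int) : Int :=
  (PySem.List.pyGet? ((PySem.List.pyGet? arr cy).getD []) cx).getD 0

-- 'for i in l: if test i: break; cnt += 1'
def pvLoopA (l : List Int) (test : Int → Bool) (cnt : Int) : Int :=
  match l with
  | [] => cnt
  | i :: rest => if test i then cnt else pvLoopA rest test (cnt + 1)

def have_five (arr : List (List Int)) (x : Int) (y : Int) : Bool :=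
  let w : Int := 15
  let h : Int := 15
  let cnt1 : Int :=  -- horizontal
    pvLoopA (PySem.List.pyRange 0 5 1)
      (fun i => (x + i == w) || (pvCell arr y (x + i) == 0))
      (pvLoopA (PySem.List.pyRange 1 5 1)
        (fun i => decide (x - i < 0) || (pvCell arr y (x - i) == 0)) 0)
  if 5 ≤ cnt1 then true else
  let cnt2 : Int :=  -- vertical
    pvLoopA (PySem.List.pyRange 0 5 1)
      (fun i => (y + i == h) || (pvCell arr (y + i) x == 0))
      (pvLoopA (PySem.List.pyRange 1 5 1)
        (fun i => decide (y - i < 0) || (pvCell arr (y - i) x == 0)) 0)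
  if 5 ≤ cnt2 then true else
  let cnt3 : Int :=  -- down-right diagonal
    pvLoopA (PySem.List.pyRange 0 5 1)
      (fun i => (x + i == w) || (y + i == h) || (pvCell arr (y + i) (x + i) == 0))
      (pvLoopA (PySem.List.pyRange 1 5 1)
        (fun i => decide (x - i < 0) || decide (y - i < 0) || (pvCell arr (y - i) (x - i) == 0)) 0)
  if 5 ≤ cnt3 then true else
  let cnt4 : Int :=  -- up-right diagonal
    pvLoopA (PySem.List.pyRange 0 5 1)
      (fun i => (x + i == w) || decide (y - i < 0) || (pvCell arr (y - i) (x + i) == 0))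
      (pvLoopA (PySem.List.pyRange 1 5 1)
        (fun i => decide (x - i < 0) || (y + i == h) || (pvCell arr (y + i) (x - i) == 0)) 0)
  if 5 ≤ cnt4 then true else
  false

-- ===== PORT B =====

-- crossed the board edge travelling in direction s (unit steps)
def pvEdge (c s : Int) : Bool :=
  if 0 < s then c == 15 else if s < 0 then decide (c < 0) else false

-- slot is live: board edge not crossed and cell nonzero (the read is arr[cy][cx];
-- pvCell's 0 default stands in for Python's raise, which Pre_ excludes)
def pvLive (arr : List (List Int)) (cx cy sx sy : Int) : Bool :=
  if pvEdge cx sx || pvEdge cy sy then false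
  else pvCell arr cy cx != 0

-- liveness flags of the walk (x,y) + k*(dx,dy), k = start..4, alive-chained
def pvRayB (arr : List (List Int)) (x y dx dy start : Int) : List Bool :=
  ((PySem.List.pyRange start 5 1).foldl
    (fun (st : Bool × List Bool) k =>
      let a := st.1 && pvLive arr (x + dx * k) (y + dy * k) dx dy
      (a, st.2 ++ [a]))
    (true, [])).2

-- list(reversed(back)) + fwd
def pvWinB (arr : List (List Int)) (x y dx dy : Int) : List Bool :=
  (pvRayB arr x y (-dx) (-dy) 1).reverse ++ pvRayB arr x y dx dy 0

-- any(all(win[s:s+5]) for s in range(5))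
def pvRunB (win : List Bool) : Bool :=
  (PySem.List.pyRange 0 5 1).any
    (fun s => (PySem.List.slice win (some s) (some (s + 5))).all (fun b => b))

def have_five_alt (arr : List (List Int)) (x : Int) (y : Int) : Bool :=
  [((1 : Int), (0 : Int)), (0, 1), (1, 1), (1, -1)].any
    (fun d => pvRunB (pvWinB arr x y d.1 d.2))

-- ===== PRECONDITION & SPEC =====

-- Pre-side mirror of Python's arr[cy][cx] read (independent of the ports)
def pvProbe (arr : List (List Int)) (cy cx : Int) : Option Int :=
  (PySem.List.pyGet? arr cy).bind (fun row => PySem.List.pyGet? row cx)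

def pvEdgeP (c s : Int) : Prop := (0 < s ∧ c = 15) ∨ (s < 0 ∧ c < 0)

-- slot off of the walk from (x,y) is live: no edge crossed, cell present and nonzero
def pvLiveP (arr : List (List Int)) (x y dx dy off : Int) : Prop :=
  ¬ pvEdgeP (x + dx * off) (dx * (if 0 ≤ off then 1 else -1)) ∧
  ¬ pvEdgeP (y + dy * off) (dy * (if 0 ≤ off then 1 else -1)) ∧
  (pvProbe arr (y + dy * off) (x + dx * off)).getD 0 ≠ 0

-- five contiguous live slots through the centre, direction (dx,dy)
def pvWinDir (arr : List (List Int)) (x y dx dy : Int) : Prop :=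
  ∃ s ∈ ([-4, -3, -2, -1, 0] : List Int),
    ∀ off ∈ PySem.List.pyRange s (s + 5) 1, pvLiveP arr x y dx dy off

-- every probe A's walk along the signed ray (dx,dy) can reach is present:
-- if no edge guard fired up to step k and the cells before k are nonzero, cell k exists
def pvSafeRay (arr : List (List Int)) (x y dx dy s0 : Int) : Prop :=
  ∀ k ∈ PySem.List.pyRange s0 5 1,
    (∀ j ∈ PySem.List.pyRange s0 (k + 1) 1,
      ¬ (pvEdgeP (x + dx * j) dx ∨ pvEdgeP (y + dy * j) dy)) →
    (∀ j ∈ PySem.List.pyRange s0 k 1, (pvProbe arr (y + dy * j) (x + dx * j)).getD 0 ≠ 0) →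
    pvProbe arr (y + dy * k) (x + dx * k) ≠ none

def pvSafeDir (arr : List (List Int)) (x y dx dy : Int) : Prop :=
  pvSafeRay arr x y (-dx) (-dy) 1 ∧ pvSafeRay arr x y dx dy 0

-- Pre_: exactly the inputs on which A returns (no IndexError): each direction's probes
-- must be present unless an earlier direction already holds five-in-a-row (A returns
-- True there and never runs the later directions)
def Pre_have_five (arr : List (List Int)) (x : Int) (y : Int) : Prop :=
  pvSafeDir arr x y 1 0 ∧
  (¬ pvWinDir arr x y 1 0 → pvSafeDir arr x y 0 1) ∧
  (¬ pvWinDir arr x y 1 0 → ¬ pvWinDir arr x y 0 1 → pvSafeDir arr x y 1 1) ∧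
  (¬ pvWinDir arr x y 1 0 → ¬ pvWinDir arr x y 0 1 → ¬ pvWinDir arr x y 1 1 →
    pvSafeDir arr x y 1 (-1))

-- decidability helpers for the instance below (defs, not instances)
def pvWinDirDec (arr : List (List Int)) (x y dx dy : Int) : Decidable (pvWinDir arr x y dx dy) := by
  unfold pvWinDir pvLiveP pvEdgeP; infer_instance
def pvSafeDirDec (arr : List (List Int)) (x y dx dy : Int) : Decidable (pvSafeDir arr x y dx dy) := by
  unfold pvSafeDir pvSafeRay pvEdgeP; infer_instance

instance (arr : List (List Int)) (x : Int) (y : Int) : Decidable (Pre_have_five arr x y) := by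
  unfold Pre_have_five
  letI := pvWinDirDec arr x y 1 0
  letI := pvWinDirDec arr x y 0 1
  letI := pvWinDirDec arr x y 1 1
  letI := pvSafeDirDec arr x y 1 0
  letI := pvSafeDirDec arr x y 0 1
  letI := pvSafeDirDec arr x y 1 1
  letI := pvSafeDirDec arr x y 1 (-1)
  infer_instance

def pvWitness_have_five : List (List Int) × Int × Int := ([[0]], 0, 0)

def Spec_have_five (arr : List (List Int)) (x : Int) (y : Int) (out : Bool) : Prop := out = have_five_alt arr x y
instance (arr : List (List Int)) (x : Int) (y : Int) (out : Bool) : Decidable (Spec_have_five arr x y out) := by unfold Spec_have_five; infer_instance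

-- ===== CLAIM (what is proved, stated in full; the proofs are below) =====
def Claim_equal_have_five : Prop := ∀ (arr : List (List Int)) (x : Int) (y : Int), Dom_have_five arr x y → Pre_have_five arr x y → Spec_have_five arr x y (have_five arr x y)

-- ===== LEMMAS AND PROOFS =====

lemma pvLoopA_congr (l : List Int) (t1 t2 : Int → Bool) (c : Int)
    (h : ∀ i ∈ l, t1 i = t2 i) : pvLoopA l t1 c = pvLoopA l t2 c := by
  induction l generalizing c with
  | nil => rfl
  | cons i rest ih =>
      simp only [pvLoopA, h i (by simp)]
      split
      · rfl
      · exact ih _ (fun j hj => h j (by simp [hj]))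

-- the bridge: A's back-count + forward-count reaches 5 iff some length-5 window of the
-- gathered 9-slot liveness list (reversed back ray ++ forward ray) is all-live
lemma pvBridge (lb lf : Int → Bool) :
    decide (5 ≤ pvLoopA (PySem.List.pyRange 0 5 1) (fun i => !lf i)
        (pvLoopA (PySem.List.pyRange 1 5 1) (fun i => !lb i) 0))
      = pvRunB ((((PySem.List.pyRange 1 5 1).foldl
            (fun (st : Bool × List Bool) k =>
              let a := st.1 && lb k
              (a, st.2 ++ [a])) (true, [])).2).reverse ++
          ((PySem.List.pyRange 0 5 1).foldl
            (fun (st : Bool × List Bool) k =>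
              let a := st.1 && lf k
              (a, st.2 ++ [a])) (true, [])).2) := by
  have e1 : PySem.List.pyRange 1 5 1 = [1, 2, 3, 4] := by decide
  have e2 : PySem.List.pyRange 0 5 1 = [0, 1, 2, 3, 4] := by decide
  simp only [pvRunB, e1, e2, List.foldl, pvLoopA, List.any_cons, List.any_nil]
  cases lb 1 <;> cases lb 2 <;> cases lb 3 <;> cases lb 4 <;> cases lf 0 <;>
    cases lf 1 <;> cases lf 2 <;> cases lf 3 <;> cases lf 4 <;> decide

-- A's break test = "B's slot is dead", for the same guard g
lemma pvTestMaster (g : Bool) (arr : List (List Int)) (cy cx : Int) :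
    (g || (pvCell arr cy cx == 0)) = !(if g then false else (pvCell arr cy cx != 0)) := by
  cases g <;> simp [bne]

lemma pvEdge_one (c : Int) : pvEdge c 1 = (c == 15) := by norm_num [pvEdge]

lemma pvEdge_neg_one (c : Int) : pvEdge c (-1) = decide (c < 0) := by norm_num [pvEdge]

lemma pvEdge_neg_neg_one (c : Int) : pvEdge c (-(-1)) = (c == 15) := by norm_num [pvEdge]

lemma pvEdge_zero (c : Int) : pvEdge c 0 = false := by norm_num [pvEdge]

lemma pvEdge_neg_zero (c : Int) : pvEdge c (-0) = false := by norm_num [pvEdge]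

lemma pvIteTrue (P : Prop) [Decidable P] (q : Bool) :
    (if P then true else q) = (decide P || q) := by
  by_cases h : P <;> simp [h]

-- ===== VERDICT (by name: the statement is the Claim_ definition above) =====
theorem have_five_spec : Claim_equal_have_five := by
  intro arr x y _hdom _hpre
  unfold Spec_have_five
  -- horizontal
  have hd1 : decide (5 ≤ pvLoopA (PySem.List.pyRange 0 5 1)
      (fun i => (x + i == 15) || (pvCell arr y (x + i) == 0))
      (pvLoopA (PySem.List.pyRange 1 5 1)
        (fun i => decide (x - i < 0) || (pvCell arr y (x - i) == 0)) 0))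
      = pvRunB (pvWinB arr x y 1 0) := by
    have hb := pvBridge (fun i : Int => pvLive arr (x + -1 * i) (y + -0 * i) (-1) (-0))
      (fun i : Int => pvLive arr (x + 1 * i) (y + 0 * i) 1 0)
    have hback : pvLoopA (PySem.List.pyRange 1 5 1)
        (fun i => decide (x - i < 0) || (pvCell arr y (x - i) == 0)) 0
        = pvLoopA (PySem.List.pyRange 1 5 1)
          (fun i => !(pvLive arr (x + -1 * i) (y + -0 * i) (-1) (-0))) 0 := by
      apply pvLoopA_congr
      intro i _hi
      simp only [pvLive]
      rw [pvEdge_neg_one, pvEdge_neg_zero, Bool.or_false,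
          show x + -1 * i = x - i by ring, show y + -0 * i = y by ring]
      exact pvTestMaster (decide (x - i < 0)) arr y (x - i)
    have hfwd : ∀ c, pvLoopA (PySem.List.pyRange 0 5 1)
        (fun i => (x + i == 15) || (pvCell arr y (x + i) == 0)) c
        = pvLoopA (PySem.List.pyRange 0 5 1)
          (fun i => !(pvLive arr (x + 1 * i) (y + 0 * i) 1 0)) c := by
      intro c
      apply pvLoopA_congr
      intro i _hi
      simp only [pvLive]
      rw [pvEdge_one, pvEdge_zero, Bool.or_false,
          show x + 1 * i = x + i by ring, show y + 0 * i = y by ring]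
      exact pvTestMaster (x + i == 15) arr y (x + i)
    rw [hback, hfwd, hb]
    rfl
  -- vertical
  have hd2 : decide (5 ≤ pvLoopA (PySem.List.pyRange 0 5 1)
      (fun i => (y + i == 15) || (pvCell arr (y + i) x == 0))
      (pvLoopA (PySem.List.pyRange 1 5 1)
        (fun i => decide (y - i < 0) || (pvCell arr (y - i) x == 0)) 0))
      = pvRunB (pvWinB arr x y 0 1) := by
    have hb := pvBridge (fun i : Int => pvLive arr (x + -0 * i) (y + -1 * i) (-0) (-1))
      (fun i : Int => pvLive arr (x + 0 * i) (y + 1 * i) 0 1)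
    have hback : pvLoopA (PySem.List.pyRange 1 5 1)
        (fun i => decide (y - i < 0) || (pvCell arr (y - i) x == 0)) 0
        = pvLoopA (PySem.List.pyRange 1 5 1)
          (fun i => !(pvLive arr (x + -0 * i) (y + -1 * i) (-0) (-1))) 0 := by
      apply pvLoopA_congr
      intro i _hi
      simp only [pvLive]
      rw [pvEdge_neg_zero, pvEdge_neg_one, Bool.false_or,
          show x + -0 * i = x by ring, show y + -1 * i = y - i by ring]
      exact pvTestMaster (decide (y - i < 0)) arr (y - i) x
    have hfwd : ∀ c, pvLoopA (PySem.List.pyRange 0 5 1)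
        (fun i => (y + i == 15) || (pvCell arr (y + i) x == 0)) c
        = pvLoopA (PySem.List.pyRange 0 5 1)
          (fun i => !(pvLive arr (x + 0 * i) (y + 1 * i) 0 1)) c := by
      intro c
      apply pvLoopA_congr
      intro i _hi
      simp only [pvLive]
      rw [pvEdge_zero, pvEdge_one, Bool.false_or,
          show x + 0 * i = x by ring, show y + 1 * i = y + i by ring]
      exact pvTestMaster (y + i == 15) arr (y + i) x
    rw [hback, hfwd, hb]
    rfl
  -- down-right diagonal
  have hd3 : decide (5 ≤ pvLoopA (PySem.List.pyRange 0 5 1)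
      (fun i => (x + i == 15) || (y + i == 15) || (pvCell arr (y + i) (x + i) == 0))
      (pvLoopA (PySem.List.pyRange 1 5 1)
        (fun i => decide (x - i < 0) || decide (y - i < 0) || (pvCell arr (y - i) (x - i) == 0)) 0))
      = pvRunB (pvWinB arr x y 1 1) := by
    have hb := pvBridge (fun i : Int => pvLive arr (x + -1 * i) (y + -1 * i) (-1) (-1))
      (fun i : Int => pvLive arr (x + 1 * i) (y + 1 * i) 1 1)
    have hback : pvLoopA (PySem.List.pyRange 1 5 1)
        (fun i => decide (x - i < 0) || decide (y - i < 0) || (pvCell arr (y - i) (x - i) == 0)) 0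
        = pvLoopA (PySem.List.pyRange 1 5 1)
          (fun i => !(pvLive arr (x + -1 * i) (y + -1 * i) (-1) (-1))) 0 := by
      apply pvLoopA_congr
      intro i _hi
      simp only [pvLive]
      rw [pvEdge_neg_one,
          show x + -1 * i = x - i by ring, show y + -1 * i = y - i by ring]
      exact pvTestMaster (decide (x - i < 0) || decide (y - i < 0)) arr (y - i) (x - i)
    have hfwd : ∀ c, pvLoopA (PySem.List.pyRange 0 5 1)
        (fun i => (x + i == 15) || (y + i == 15) || (pvCell arr (y + i) (x + i) == 0)) c
        = pvLoopA (PySem.List.pyRange 0 5 1)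
          (fun i => !(pvLive arr (x + 1 * i) (y + 1 * i) 1 1)) c := by
      intro c
      apply pvLoopA_congr
      intro i _hi
      simp only [pvLive]
      rw [pvEdge_one,
          show x + 1 * i = x + i by ring, show y + 1 * i = y + i by ring]
      exact pvTestMaster ((x + i == 15) || (y + i == 15)) arr (y + i) (x + i)
    rw [hback, hfwd, hb]
    rfl
  -- up-right diagonal
  have hd4 : decide (5 ≤ pvLoopA (PySem.List.pyRange 0 5 1)
      (fun i => (x + i == 15) || decide (y - i < 0) || (pvCell arr (y - i) (x + i) == 0))
      (pvLoopA (PySem.List.pyRange 1 5 1)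
        (fun i => decide (x - i < 0) || (y + i == 15) || (pvCell arr (y + i) (x - i) == 0)) 0))
      = pvRunB (pvWinB arr x y 1 (-1)) := by
    have hb := pvBridge (fun i : Int => pvLive arr (x + -1 * i) (y + -(-1) * i) (-1) (-(-1)))
      (fun i : Int => pvLive arr (x + 1 * i) (y + (-1) * i) 1 (-1))
    have hback : pvLoopA (PySem.List.pyRange 1 5 1)
        (fun i => decide (x - i < 0) || (y + i == 15) || (pvCell arr (y + i) (x - i) == 0)) 0
        = pvLoopA (PySem.List.pyRange 1 5 1)
          (fun i => !(pvLive arr (x + -1 * i) (y + -(-1) * i) (-1) (-(-1)))) 0 := by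
      apply pvLoopA_congr
      intro i _hi
      simp only [pvLive]
      rw [pvEdge_neg_one, pvEdge_neg_neg_one,
          show x + -1 * i = x - i by ring, show y + -(-1) * i = y + i by ring]
      exact pvTestMaster (decide (x - i < 0) || (y + i == 15)) arr (y + i) (x - i)
    have hfwd : ∀ c, pvLoopA (PySem.List.pyRange 0 5 1)
        (fun i => (x + i == 15) || decide (y - i < 0) || (pvCell arr (y - i) (x + i) == 0)) c
        = pvLoopA (PySem.List.pyRange 0 5 1)
          (fun i => !(pvLive arr (x + 1 * i) (y + (-1) * i) 1 (-1))) c := by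
      intro c
      apply pvLoopA_congr
      intro i _hi
      simp only [pvLive]
      rw [pvEdge_one, pvEdge_neg_one,
          show x + 1 * i = x + i by ring, show y + (-1) * i = y - i by ring]
      exact pvTestMaster ((x + i == 15) || decide (y - i < 0)) arr (y - i) (x + i)
    rw [hback, hfwd, hb]
    rfl
  simp only [have_five, have_five_alt, List.any_cons, List.any_nil, Bool.or_false]
  rw [pvIteTrue, pvIteTrue, pvIteTrue, pvIteTrue, Bool.or_false]
  rw [hd1, hd2, hd3, hd4]
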